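-- pv_equiv track=rewrite | github.com/Kaeun-Lee/Algorithm | Programmers/Level1/예산.py | solution
-- ===== SOURCE A (Python) =====
-- def solution(d, budget):
--     d.sort()
--     cnt = 0
--     for i in d:
--         budget -= i  # 예산 - 부서별 신청 금액
--         if budget >= 0:
--             cnt += 1
--         else:
--             return cnt
--     return cnt
-- ===== SOURCE B (Python) =====
-- def solution(d, budget):
--     d.sort()
--     prefix = []
--     s = 0
--     for x in d:
--         s += x
--         prefix.append(s)
--     cnt = 0
--     while cnt < len(prefix) and prefix[cnt] <= budget:
--         cnt += 1
--     return cnt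
-- ===== Notes on version B (the rewrite author's own statement) =====
-- stated objective: alternative
-- what changed: B precomputes the prefix-sum table of the sorted list and then counts the leading entries that are <= budget, instead of A's greedy loop that mutates the remaining budget and returns early on the first overdraft.
import Mathlib
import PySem

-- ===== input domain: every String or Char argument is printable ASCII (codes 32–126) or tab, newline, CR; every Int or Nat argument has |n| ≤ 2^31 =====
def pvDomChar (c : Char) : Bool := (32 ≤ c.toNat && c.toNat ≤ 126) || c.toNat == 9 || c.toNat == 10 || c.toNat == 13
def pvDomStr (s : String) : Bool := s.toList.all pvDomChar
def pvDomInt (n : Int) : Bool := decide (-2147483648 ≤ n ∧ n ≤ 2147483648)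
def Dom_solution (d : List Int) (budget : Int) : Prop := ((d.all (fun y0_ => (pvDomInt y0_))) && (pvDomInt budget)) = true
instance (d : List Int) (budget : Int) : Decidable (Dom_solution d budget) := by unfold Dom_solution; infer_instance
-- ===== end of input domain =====

-- ===== PORT A =====
-- B is a structural alternative (prefix-sum table + count) of A's greedy budget-subtraction
-- loop; equivalence is about the RETURN value only (both sort the argument in place in Python).
def solLoopA : List Int → Int → Int → Int
  | [], _, cnt => cnt
  | i :: rest, budget, cnt =>
      let budget' := budget - i
      if budget' ≥ 0 then solLoopA rest budget' (cnt + 1) else cnt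

def solution (d : List Int) (budget : Int) : Int :=
  solLoopA (PySem.List.sorted d (fun x => x) false) budget 0

-- ===== PORT B =====
def solPrefix : List Int → Int → List Int
  | [], _ => []
  | x :: rest, s => (s + x) :: solPrefix rest (s + x)

def solCountLe : List Int → Int → Int
  | [], _ => 0
  | p :: rest, budget => if p ≤ budget then 1 + solCountLe rest budget else 0

def solution_alt (d : List Int) (budget : Int) : Int :=
  solCountLe (solPrefix (PySem.List.sorted d (fun x => x) false) 0) budget

-- ===== PRECONDITION & SPEC =====
def Spec_solution (d : List Int) (budget : Int) (out : Int) : Prop := out = solution_alt d budget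
instance (d : List Int) (budget : Int) (out : Int) : Decidable (Spec_solution d budget out) := by unfold Spec_solution; infer_instance

-- ===== CLAIM (what is proved, stated in full; the proofs are below) =====
def Claim_equal_solution : Prop := ∀ (d : List Int) (budget : Int), Dom_solution d budget → Spec_solution d budget (solution d budget)

-- ===== LEMMAS AND PROOFS =====
theorem solCountLe_prefix (xs : List Int) (s budget : Int) :
    solCountLe (solPrefix xs s) budget = solCountLe (solPrefix xs 0) (budget - s) := by
  induction xs generalizing s budget with
  | nil => simp [solPrefix, solCountLe]
  | cons x rest ih =>
      simp only [solPrefix, solCountLe]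
      rw [ih (s + x) budget, ih (0 + x) (budget - s)]
      have h2 : budget - (s + x) = budget - s - (0 + x) := by ring
      rw [h2]
      by_cases hc : s + x ≤ budget
      · rw [if_pos hc, if_pos (by omega : (0:Int) + x ≤ budget - s)]
      · rw [if_neg hc, if_neg (by omega : ¬ ((0:Int) + x ≤ budget - s))]

theorem solLoopA_eq (xs : List Int) (budget cnt : Int) :
    solLoopA xs budget cnt = cnt + solCountLe (solPrefix xs 0) budget := by
  induction xs generalizing budget cnt with
  | nil => simp [solLoopA, solPrefix, solCountLe]
  | cons x rest ih =>
      simp only [solLoopA, solPrefix, solCountLe]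
      rw [solCountLe_prefix rest (0 + x) budget]
      by_cases h : budget - x ≥ 0
      · rw [if_pos h, if_pos (by omega : (0:Int) + x ≤ budget), ih]
        have : budget - (0 + x) = budget - x := by ring
        rw [this]; ring
      · rw [if_neg h, if_neg (by omega : ¬ ((0:Int) + x ≤ budget))]
        ring

-- ===== VERDICT (by name: the statement is the Claim_ definition above) =====
theorem solution_spec : Claim_equal_solution := by
  intro d budget _
  show solution d budget = solution_alt d budget
  unfold solution solution_alt
  rw [solLoopA_eq]
  ring
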